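-- pv_equiv track=rewrite | github.com/HanifAmeen/AI-Dream-Journal-REMinder- | ai_dream_journal/utils/analyzer_upgraded.py | bucket_symbols
-- ===== SOURCE A (Python) =====
-- def bucket_symbols(ranked):
--     p, s, n = [],[],[]
--     for r in ranked:
--         w = r["weight"]
--         if w >= 75: p.append(r)
--         elif w >= 55: s.append(r)
--         else: n.append(r)
--     return p,s,n
-- ===== SOURCE B (Python) =====
-- def bucket_symbols(ranked):
--     p = [r for r in ranked if r["weight"] >= 75]
--     s = [r for r in ranked if 55 <= r["weight"] < 75]
--     n = [r for r in ranked if r["weight"] < 55]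
--     return p, s, n
-- ===== Notes on version B (the rewrite author's own statement) =====
-- stated objective: idiomatic
-- what changed: Replaces the single stateful partitioning loop with three accumulators by three independent filtering comprehensions, one per bucket.
import Mathlib
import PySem

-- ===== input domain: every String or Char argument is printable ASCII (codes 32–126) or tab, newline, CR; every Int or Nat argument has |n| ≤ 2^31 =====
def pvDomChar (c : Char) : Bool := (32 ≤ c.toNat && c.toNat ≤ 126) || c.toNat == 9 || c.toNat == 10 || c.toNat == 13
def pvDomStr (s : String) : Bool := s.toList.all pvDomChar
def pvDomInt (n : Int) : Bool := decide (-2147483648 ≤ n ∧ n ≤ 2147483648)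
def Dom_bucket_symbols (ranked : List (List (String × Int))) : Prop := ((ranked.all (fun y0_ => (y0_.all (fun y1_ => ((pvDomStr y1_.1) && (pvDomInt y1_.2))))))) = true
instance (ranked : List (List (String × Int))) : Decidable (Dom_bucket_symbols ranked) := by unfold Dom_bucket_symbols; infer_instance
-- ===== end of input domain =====

-- B partitions by three independent filter passes instead of A's single loop with three accumulators (idiomatic, same cost).

-- r["weight"]: first-match association-list lookup, defaulting to 0 (the default is unreachable inside Pre_, where every dict has the key)
def pvWeight (r : List (String × Int)) : Int :=
  (((r.find? (fun kv => kv.1 == "weight")).map (·.2)).getD 0)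

-- ===== PORT A =====
def bucket_symbols (ranked : List (List (String × Int))) : (List (List (String × Int))) × (List (List (String × Int))) × (List (List (String × Int))) :=
  ranked.foldl
    (fun acc r =>
      let w := pvWeight r
      if w ≥ 75 then (acc.1 ++ [r], acc.2.1, acc.2.2)
      else if w ≥ 55 then (acc.1, acc.2.1 ++ [r], acc.2.2)
      else (acc.1, acc.2.1, acc.2.2 ++ [r]))
    ([], [], [])

-- ===== PORT B =====
def bucket_symbols_alt (ranked : List (List (String × Int))) : (List (List (String × Int))) × (List (List (String × Int))) × (List (List (String × Int))) :=
  (ranked.filter (fun r => pvWeight r ≥ 75),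
   ranked.filter (fun r => 55 ≤ pvWeight r ∧ pvWeight r < 75),
   ranked.filter (fun r => pvWeight r < 55))

-- ===== PRECONDITION & SPEC =====
-- Pre_ excludes inputs where some dict lacks the key "weight": there the Python A (and B) raises KeyError.
def Pre_bucket_symbols (ranked : List (List (String × Int))) : Prop :=
  ∀ r ∈ ranked, r.any (fun kv => kv.1 == "weight") = true
instance (ranked : List (List (String × Int))) : Decidable (Pre_bucket_symbols ranked) := by unfold Pre_bucket_symbols; infer_instance

def pvWitness_bucket_symbols : (List (List (String × Int))) :=
  [[("weight", 80), ("x", 1)], [("weight", 60)], [("weight", 10)]]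

def Spec_bucket_symbols (ranked : List (List (String × Int))) (out : (List (List (String × Int))) × (List (List (String × Int))) × (List (List (String × Int)))) : Prop := out = bucket_symbols_alt ranked
instance (ranked : List (List (String × Int))) (out : (List (List (String × Int))) × (List (List (String × Int))) × (List (List (String × Int)))) : Decidable (Spec_bucket_symbols ranked out) := by unfold Spec_bucket_symbols; infer_instance

-- ===== CLAIM (what is proved, stated in full; the proofs are below) =====
def Claim_equal_bucket_symbols : Prop := ∀ (ranked : List (List (String × Int))), Dom_bucket_symbols ranked → Pre_bucket_symbols ranked → Spec_bucket_symbols ranked (bucket_symbols ranked)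

-- ===== LEMMAS AND PROOFS =====

-- loop invariant: the fold started from (p, s, n) appends each filter of the remaining list
theorem bucket_foldl_eq (ranked p s n : List (List (String × Int))) :
    ranked.foldl
      (fun acc r =>
        let w := pvWeight r
        if w ≥ 75 then (acc.1 ++ [r], acc.2.1, acc.2.2)
        else if w ≥ 55 then (acc.1, acc.2.1 ++ [r], acc.2.2)
        else (acc.1, acc.2.1, acc.2.2 ++ [r]))
      (p, s, n)
    = (p ++ ranked.filter (fun r => pvWeight r ≥ 75),
       s ++ ranked.filter (fun r => 55 ≤ pvWeight r ∧ pvWeight r < 75),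
       n ++ ranked.filter (fun r => pvWeight r < 55)) := by
  induction ranked generalizing p s n with
  | nil => simp
  | cons r rest ih =>
    simp only [List.foldl_cons, List.filter_cons]
    by_cases h75 : pvWeight r ≥ 75
    · have h1 : ¬ (55 ≤ pvWeight r ∧ pvWeight r < 75) := by omega
      have h2 : ¬ pvWeight r < 55 := by omega
      simp [h75, h1, h2, ih]
    · by_cases h55 : pvWeight r ≥ 55
      · have h1 : (55 ≤ pvWeight r ∧ pvWeight r < 75) := by omega
        have h2 : ¬ pvWeight r < 55 := by omega
        simp [h75, h55, h2, ih]
      · have h2 : pvWeight r < 55 := by omega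
        have h1 : ¬ (55 ≤ pvWeight r ∧ pvWeight r < 75) := by omega
        simp [h75, h55, h2, ih]

-- ===== VERDICT (by name: the statement is the Claim_ definition above) =====
theorem bucket_symbols_spec : Claim_equal_bucket_symbols := by
  intro ranked _ _
  unfold Spec_bucket_symbols bucket_symbols bucket_symbols_alt
  simpa using bucket_foldl_eq ranked [] [] []
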